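-- pv_equiv track=rewrite | github.com/rajubugude/ds_algo | graphs/dfs_algo.py | dfs_disconnected
-- ===== SOURCE A (Python) =====
-- def dfs_helper(ans, vis, node, adjList):
--     vis[node] = 1
--     ans.append(node)
--     for adjNode in adjList[node]:
--         if not vis[adjNode]:
--             dfs_helper(ans, vis, adjNode, adjList)
--
-- def dfs_disconnected(adjList):
--     n = len(adjList)
--     vis = [0] * n
--     ans = []
--     for i in range(n):
--         if not vis[i]:
--             dfs_helper(ans, vis, i, adjList)
--     return ans
-- ===== SOURCE B (Python) =====
-- def dfs_disconnected(adjList):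
--     n = len(adjList)
--     vis = [0] * n
--     ans = []
--     for i in range(n):
--         if vis[i]:
--             continue
--         stack = [i]
--         while stack:
--             node = stack.pop()
--             if vis[node]:
--                 continue
--             vis[node] = 1
--             ans.append(node)
--             for nb in reversed(adjList[node]):
--                 stack.append(nb)
--     return ans
-- ===== Notes on version B (the rewrite author's own statement) =====
-- stated objective: alternative
-- what changed: Replaces the recursive dfs_helper with an explicit list-stack loop that pops a node, marks and appends it at pop time, and pushes its neighbors in reverse order, yielding the identical preorder discovery sequence without recursion.
import Mathlib
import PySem

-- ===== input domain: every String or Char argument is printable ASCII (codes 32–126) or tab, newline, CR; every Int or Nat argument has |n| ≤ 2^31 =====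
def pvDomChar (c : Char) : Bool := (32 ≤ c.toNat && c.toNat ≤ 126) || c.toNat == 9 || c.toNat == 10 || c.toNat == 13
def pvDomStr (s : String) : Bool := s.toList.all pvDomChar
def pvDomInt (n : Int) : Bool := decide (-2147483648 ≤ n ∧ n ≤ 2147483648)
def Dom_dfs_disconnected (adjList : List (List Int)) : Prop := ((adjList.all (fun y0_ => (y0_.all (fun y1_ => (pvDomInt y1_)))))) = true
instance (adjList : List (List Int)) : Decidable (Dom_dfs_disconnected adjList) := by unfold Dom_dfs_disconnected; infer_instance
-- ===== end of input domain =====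

-- B replaces A's recursive dfs_helper by an explicit stack loop (pop-time marking, neighbors
-- pushed in reverse), same preorder output; objective: alternative decomposition, not speed.

-- ===== PORT A =====
-- dfs_helper(ans, vis, node, adjList): the in-place mutation of vis/ans is threaded as a state
-- pair. The recursion is guarded by fuel; fuel n+1 is never exhausted, because every call is
-- made on a node whose vis-cell is 0 and immediately sets it to 1 (recursion depth ≤ n).
-- `vis[node] = 1` is PySem.List.pySetD, `vis[adjNode]`/`adjList[node]` are PySem.List.pyGet?:
-- the guard `pyGet? st.1 j = some 0` is Python's `if not vis[adjNode]` (none = IndexError is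
-- excluded by Pre_; there the port skips).
def dfsHelperA (adjList : List (List Int)) : Nat → List Int → List Int → Int → List Int × List Int
  | 0, vis, ans, _ => (vis, ans)
  | Nat.succ f, vis, ans, node =>
      ((PySem.List.pyGet? adjList node).getD []).foldl
        (fun st j =>
          if PySem.List.pyGet? st.1 j = some 0 then dfsHelperA adjList f st.1 st.2 j else st)
        (PySem.List.pySetD vis node 1, ans ++ [node])

-- the body of A's outer loop: `if not vis[i]: dfs_helper(ans, vis, i, adjList)`
def pvVisit (adjList : List (List Int)) (f : Nat) (st : List Int × List Int) (node : Int) :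
    List Int × List Int :=
  if PySem.List.pyGet? st.1 node = some 0 then dfsHelperA adjList f st.1 st.2 node else st

def dfs_disconnected (adjList : List (List Int)) : List Int :=
  ((PySem.List.pyRange 0 adjList.length 1).foldl
    (pvVisit adjList (adjList.length + 1))
    (List.replicate adjList.length 0, ([] : List Int))).2

-- ===== PORT B =====
-- number of 0-cells of vis: the termination measure of B's while-loop
def pvZeros (vis : List Int) : Nat := vis.count 0

-- cited by stackLoopB's decreasing_by: marking an unvisited cell strictly shrinks pvZeros
lemma pvIdx_lt (n : Nat) (i : Int) (k : Nat) (h : PySem.List.pyIdx? n i = some k) : k < n := by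
  unfold PySem.List.pyIdx? at h; split at h <;> simp_all <;> omega

lemma pvZeros_set_lt (vis : List Int) (node : Int)
    (h : PySem.List.pyGet? vis node = some 0) :
    pvZeros (PySem.List.pySetD vis node 1) < pvZeros vis := by
  unfold PySem.List.pyGet? at h
  cases hk : PySem.List.pyIdx? vis.length node with
  | none => rw [hk] at h; simp at h
  | some k =>
    rw [hk] at h
    simp at h
    have hkl : k < vis.length := pvIdx_lt _ _ _ hk
    have hv : vis[k] = 0 := by
      have := List.getElem?_eq_getElem hkl; simp_all
    have hset : PySem.List.pySetD vis node 1 = vis.set k 1 := by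
      simp [PySem.List.pySetD, PySem.List.pySet?, hk]
    have hcnt := List.count_set (a := (1:Int)) (b := (0:Int)) (l := vis) (i := k) hkl
    simp [hv] at hcnt
    have hpos : 0 < vis.count 0 := List.count_pos_iff.mpr (by
      have : vis[k] ∈ vis := List.getElem_mem hkl
      rw [hv] at this; exact this)
    unfold pvZeros
    rw [hset, hcnt]
    omega

-- B's while-loop: pop `node`, skip if visited, else mark, append, push reversed neighbors
-- (pushing reversed(adjList[node]) one by one puts adjList[node] in order on top of the stack,
-- so the Lean stack — head = top — becomes neighbors ++ rest).
def stackLoopB (adjList : List (List Int)) (vis ans stk : List Int) : List Int × List Int :=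
  match stk with
  | [] => (vis, ans)
  | node :: stk' =>
    if h : PySem.List.pyGet? vis node = some 0 then
      stackLoopB adjList (PySem.List.pySetD vis node 1) (ans ++ [node])
        (((PySem.List.pyGet? adjList node).getD []) ++ stk')
    else
      stackLoopB adjList vis ans stk'
termination_by (pvZeros vis, stk.length)
decreasing_by
  · exact Prod.Lex.left _ _ (pvZeros_set_lt vis node h)
  · exact Prod.Lex.right _ (by simp)

-- the body of B's outer loop: `if vis[i]: continue` / `stack = [i]` / `while stack: …`
def pvVisitIter (adjList : List (List Int)) (st : List Int × List Int) (i : Int) :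
    List Int × List Int :=
  if PySem.List.pyGet? st.1 i = some 0 then stackLoopB adjList st.1 st.2 [i] else st

def dfs_disconnected_alt (adjList : List (List Int)) : List Int :=
  ((PySem.List.pyRange 0 adjList.length 1).foldl
    (pvVisitIter adjList)
    (List.replicate adjList.length 0, ([] : List Int))).2

-- ===== PRECONDITION & SPEC =====
-- Pre_ excludes exactly the inputs where Python's `vis[adjNode]` raises IndexError: a neighbor
-- outside [-n, n) (negative in-range neighbors wrap around Python-style and are kept inside).
def Pre_dfs_disconnected (adjList : List (List Int)) : Prop :=
  ∀ row ∈ adjList, ∀ j ∈ row, PySem.Raise.InRange adjList.length j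
instance (adjList : List (List Int)) : Decidable (Pre_dfs_disconnected adjList) := by
  unfold Pre_dfs_disconnected; infer_instance

def pvWitness_dfs_disconnected : List (List Int) := [[1, -2], [0], [1]]

def Spec_dfs_disconnected (adjList : List (List Int)) (out : List Int) : Prop :=
  out = dfs_disconnected_alt adjList
instance (adjList : List (List Int)) (out : List Int) : Decidable (Spec_dfs_disconnected adjList out) := by
  unfold Spec_dfs_disconnected; infer_instance

-- ===== CLAIM (what is proved, stated in full; the proofs are below) =====
def Claim_equal_dfs_disconnected : Prop := ∀ (adjList : List (List Int)), Dom_dfs_disconnected adjList → Pre_dfs_disconnected adjList → Spec_dfs_disconnected adjList (dfs_disconnected adjList)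

-- ===== LEMMAS AND PROOFS =====

lemma stackLoopB_nil (adjList : List (List Int)) (vis ans : List Int) :
    stackLoopB adjList vis ans [] = (vis, ans) := by
  rw [stackLoopB]

lemma stackLoopB_cons (adjList : List (List Int)) (vis ans : List Int) (node : Int)
    (stk' : List Int) :
    stackLoopB adjList vis ans (node :: stk') =
      if PySem.List.pyGet? vis node = some 0 then
        stackLoopB adjList (PySem.List.pySetD vis node 1) (ans ++ [node])
          (((PySem.List.pyGet? adjList node).getD []) ++ stk')
      else
        stackLoopB adjList vis ans stk' := by
  rw [stackLoopB]; simp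

-- processing with fuel 1+f starting at an unvisited node = mark+append then fold the neighbors
lemma dfsHelperA_succ (adjList : List (List Int)) (f : Nat) (vis ans : List Int) (node : Int) :
    dfsHelperA adjList (f + 1) vis ans node =
      ((PySem.List.pyGet? adjList node).getD []).foldl (pvVisit adjList f)
        (PySem.List.pySetD vis node 1, ans ++ [node]) := rfl

-- pvZeros never increases
lemma pvZeros_set1_le (vis : List Int) (node : Int) :
    pvZeros (PySem.List.pySetD vis node 1) ≤ pvZeros vis := by
  cases hk : PySem.List.pyIdx? vis.length node with
  | none => simp [pvZeros, PySem.List.pySetD, PySem.List.pySet?, hk]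
  | some k =>
    have hkl : k < vis.length := pvIdx_lt _ _ _ hk
    have hset : PySem.List.pySetD vis node 1 = vis.set k 1 := by
      simp [PySem.List.pySetD, PySem.List.pySet?, hk]
    have hcnt := List.count_set (a := (1:Int)) (b := (0:Int)) (l := vis) (i := k) hkl
    simp at hcnt
    unfold pvZeros
    rw [hset, hcnt]
    split <;> omega

lemma pvZeros_foldl_le (step : List Int × List Int → Int → List Int × List Int)
    (hstep : ∀ st j, pvZeros (step st j).1 ≤ pvZeros st.1) :
    ∀ (l : List Int) (st : List Int × List Int), pvZeros (l.foldl step st).1 ≤ pvZeros st.1 := by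
  intro l
  induction l with
  | nil => intro st; simp
  | cons j l ih =>
    intro st
    calc pvZeros ((j :: l).foldl step st).1 = pvZeros (l.foldl step (step st j)).1 := by simp
    _ ≤ pvZeros (step st j).1 := ih _
    _ ≤ pvZeros st.1 := hstep st j

lemma pvZeros_dfsHelperA_le (adjList : List (List Int)) :
    ∀ (f : Nat) (vis ans : List Int) (node : Int),
      pvZeros (dfsHelperA adjList f vis ans node).1 ≤ pvZeros vis := by
  intro f
  induction f with
  | zero => intro vis ans node; simp [dfsHelperA]
  | succ f ih =>
    intro vis ans node
    rw [dfsHelperA_succ]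
    have hstep : ∀ st j, pvZeros (pvVisit adjList f st j).1 ≤ pvZeros st.1 := by
      intro st j
      unfold pvVisit
      split
      · exact ih st.1 st.2 j
      · exact le_refl _
    calc pvZeros (((PySem.List.pyGet? adjList node).getD []).foldl (pvVisit adjList f)
          (PySem.List.pySetD vis node 1, ans ++ [node])).1
        ≤ pvZeros (PySem.List.pySetD vis node 1) := pvZeros_foldl_le _ hstep _ _
      _ ≤ pvZeros vis := pvZeros_set1_le vis node

lemma pvVisit_zeros_le (adjList : List (List Int)) (f : Nat) (st : List Int × List Int)
    (j : Int) : pvZeros (pvVisit adjList f st j).1 ≤ pvZeros st.1 := by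
  unfold pvVisit; split
  · exact pvZeros_dfsHelperA_le adjList f st.1 st.2 j
  · exact le_refl _

-- the central lemma: draining `nbrs ++ stk` on B's stack machine = A's fold of pvVisit over
-- nbrs, then draining stk.  Strong induction on pvZeros vis, inner induction on nbrs.
lemma pvMain (adjList : List (List Int)) :
    ∀ (k : Nat) (vis : List Int), pvZeros vis = k →
      ∀ (nbrs ans stk : List Int) (f : Nat), k ≤ f →
        stackLoopB adjList vis ans (nbrs ++ stk) =
          stackLoopB adjList (nbrs.foldl (pvVisit adjList f) (vis, ans)).1
            (nbrs.foldl (pvVisit adjList f) (vis, ans)).2 stk := by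
  intro k
  induction k using Nat.strong_induction_on with
  | _ k IH =>
    intro vis hk nbrs
    induction nbrs with
    | nil => intro ans stk f _; simp
    | cons j rest ihr =>
      intro ans stk f hf
      by_cases h : PySem.List.pyGet? vis j = some 0
      · -- unvisited head: one B step = one recursive A call (outer IH twice)
        have hlt := pvZeros_set_lt vis j h
        rw [hk] at hlt
        have hk1 : 1 ≤ k := by omega
        obtain ⟨f', rfl⟩ : ∃ f', f = f' + 1 := ⟨f - 1, by omega⟩
        have step1 : stackLoopB adjList vis ans ((j :: rest) ++ stk) =
            stackLoopB adjList (PySem.List.pySetD vis j 1) (ans ++ [j])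
              (((PySem.List.pyGet? adjList j).getD []) ++ (rest ++ stk)) := by
          rw [List.cons_append, stackLoopB_cons, if_pos h]
        rw [step1]
        rw [IH (pvZeros (PySem.List.pySetD vis j 1)) hlt _ rfl _ _ _ f' (by omega)]
        set st2 := ((PySem.List.pyGet? adjList j).getD []).foldl (pvVisit adjList f')
          (PySem.List.pySetD vis j 1, ans ++ [j]) with hst2
        have hz2 : pvZeros st2.1 < k := by
          have : pvZeros st2.1 ≤ pvZeros (PySem.List.pySetD vis j 1) := by
            rw [hst2]; exact pvZeros_foldl_le _ (pvVisit_zeros_le adjList f') _ _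
          omega
        rw [IH (pvZeros st2.1) hz2 _ rfl rest st2.2 stk (f' + 1) (by omega)]
        have hA : List.foldl (pvVisit adjList (f' + 1)) (vis, ans) (j :: rest)
            = List.foldl (pvVisit adjList (f' + 1)) (st2.1, st2.2) rest := by
          simp only [List.foldl_cons]
          congr 1
          show pvVisit adjList (f' + 1) (vis, ans) j = (st2.1, st2.2)
          unfold pvVisit
          show (if PySem.List.pyGet? vis j = some 0 then
              dfsHelperA adjList (f' + 1) vis ans j else (vis, ans)) = (st2.1, st2.2)
          rw [if_pos h, dfsHelperA_succ, ← hst2]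
        rw [hA]
      · -- visited or out-of-range head: both sides skip it
        have step1 : stackLoopB adjList vis ans ((j :: rest) ++ stk) =
            stackLoopB adjList vis ans (rest ++ stk) := by
          rw [List.cons_append, stackLoopB_cons, if_neg h]
        rw [step1, ihr ans stk f hf]
        have hA : List.foldl (pvVisit adjList f) (vis, ans) (j :: rest)
            = List.foldl (pvVisit adjList f) (vis, ans) rest := by
          simp only [List.foldl_cons]
          congr 1
          show pvVisit adjList f (vis, ans) j = (vis, ans)
          unfold pvVisit
          show (if PySem.List.pyGet? vis j = some 0 then
              dfsHelperA adjList f vis ans j else (vis, ans)) = (vis, ans)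
          rw [if_neg h]
        rw [hA]

-- lengths are preserved, so pvZeros ≤ adjList.length stays available along the outer loop
lemma pvLen_set1 (vis : List Int) (node : Int) :
    (PySem.List.pySetD vis node 1).length = vis.length := by
  cases hk : PySem.List.pyIdx? vis.length node with
  | none => simp [PySem.List.pySetD, PySem.List.pySet?, hk]
  | some k => simp [PySem.List.pySetD, PySem.List.pySet?, hk]

lemma pvLen_foldl (step : List Int × List Int → Int → List Int × List Int)
    (hstep : ∀ st j, (step st j).1.length = st.1.length) :
    ∀ (l : List Int) (st : List Int × List Int), (l.foldl step st).1.length = st.1.length := by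
  intro l
  induction l with
  | nil => intro st; simp
  | cons j l ih => intro st; simp only [List.foldl_cons]; rw [ih, hstep]

lemma pvLen_dfsHelperA (adjList : List (List Int)) :
    ∀ (f : Nat) (vis ans : List Int) (node : Int),
      (dfsHelperA adjList f vis ans node).1.length = vis.length := by
  intro f
  induction f with
  | zero => intro vis ans node; simp [dfsHelperA]
  | succ f ih =>
    intro vis ans node
    rw [dfsHelperA_succ]
    have hstep : ∀ st j, ((pvVisit adjList f st j).1.length = st.1.length) := by
      intro st j; unfold pvVisit; split
      · exact ih st.1 st.2 j
      · rfl
    rw [pvLen_foldl _ hstep, pvLen_set1]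

lemma pvVisit_len (adjList : List (List Int)) (f : Nat) (st : List Int × List Int) (j : Int) :
    (pvVisit adjList f st j).1.length = st.1.length := by
  unfold pvVisit; split
  · exact pvLen_dfsHelperA adjList f st.1 st.2 j
  · rfl

-- one outer-loop step of A = one outer-loop step of B (needs vis no longer than n for fuel)
lemma pvStep_eq (adjList : List (List Int)) (st : List Int × List Int) (i : Int)
    (hlen : st.1.length = adjList.length) :
    pvVisit adjList (adjList.length + 1) st i = pvVisitIter adjList st i := by
  unfold pvVisit pvVisitIter
  by_cases h : PySem.List.pyGet? st.1 i = some 0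
  · rw [if_pos h, if_pos h]
    have hfuel : pvZeros st.1 ≤ adjList.length + 1 := by
      have : pvZeros st.1 ≤ st.1.length := List.count_le_length
      omega
    have hm := pvMain adjList (pvZeros st.1) st.1 rfl [i] st.2 []
      (adjList.length + 1) hfuel
    simp only [List.append_nil] at hm
    rw [hm, stackLoopB_nil]
    have : List.foldl (pvVisit adjList (adjList.length + 1)) (st.1, st.2) [i]
        = pvVisit adjList (adjList.length + 1) st i := by
      simp only [List.foldl_cons, List.foldl_nil]
    rw [this]
    unfold pvVisit
    rw [if_pos h]
  · rw [if_neg h, if_neg h]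

lemma pvFold_eq (adjList : List (List Int)) :
    ∀ (l : List Int) (st : List Int × List Int), st.1.length = adjList.length →
      l.foldl (pvVisit adjList (adjList.length + 1)) st = l.foldl (pvVisitIter adjList) st := by
  intro l
  induction l with
  | nil => intro st _; rfl
  | cons i l ih =>
    intro st hlen
    simp only [List.foldl_cons]
    rw [pvStep_eq adjList st i hlen, ← pvStep_eq adjList st i hlen]
    rw [ih _ (by rw [pvVisit_len]; exact hlen), pvStep_eq adjList st i hlen]

-- ===== VERDICT (by name: the statement is the Claim_ definition above) =====
theorem dfs_disconnected_spec : Claim_equal_dfs_disconnected := by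
  intro adjList _ _
  unfold Spec_dfs_disconnected dfs_disconnected dfs_disconnected_alt
  rw [pvFold_eq adjList _ _ (by simp)]
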